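-- pv_equiv track=rewrite | github.com/code-89/ping-bot | windows.py | response_parse
-- ===== SOURCE A (Python) =====
-- def response_parse(response, numbers_list, hostname):
--     time_response = []
--     for i in numbers_list:
--         received_time = ''
--         try:
--             time = response.split('=')[i]
--         except IndexError:
--             return '<Error: 1> ' + hostname + '\n<превышен интервал ожидания>'
--         for char in time:
--             if char.isdecimal():
--                 received_time += char
--             else:
--                 continue
--         time_response.append(received_time)
--     return result(time_response, len(numbers_list), hostname)
--
-- def result(time_response, request_count, hostname):
--     result = ''
--     try:
--         for i in range(request_count):
--             result += 'Время ответа = ' + time_response[i] + ' ms \n'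
--     except IndexError:
--         return '<Error: 2> ' + hostname + '\n<невозможно вывести результат>'
--     return 'Адрес ' + hostname + ' доступен! \u2705 \n' + result
-- ===== SOURCE B (Python) =====
-- def response_parse(response, numbers_list, hostname):
--     parts = response.split('=')
--     body = 'Адрес ' + hostname + ' доступен! \u2705 \n'
--     for i in numbers_list:
--         if not -len(parts) <= i < len(parts):
--             return '<Error: 1> ' + hostname + '\n<превышен интервал ожидания>'
--         digits = ''.join(c for c in parts[i] if c.isdecimal())
--         body += 'Время ответа = ' + digits + ' ms \n'
--     return body
-- ===== Notes on version B (the rewrite author's own statement) =====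
-- stated objective: simpler
-- what changed: B fuses A's two passes (collect filtered times into a list, then a second indexed loop formatting them via the helper result()) into a single loop over numbers_list that appends each formatted line directly to the header string, dropping the intermediate list, the helper and its unreachable '<Error: 2>' branch.
import Mathlib
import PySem

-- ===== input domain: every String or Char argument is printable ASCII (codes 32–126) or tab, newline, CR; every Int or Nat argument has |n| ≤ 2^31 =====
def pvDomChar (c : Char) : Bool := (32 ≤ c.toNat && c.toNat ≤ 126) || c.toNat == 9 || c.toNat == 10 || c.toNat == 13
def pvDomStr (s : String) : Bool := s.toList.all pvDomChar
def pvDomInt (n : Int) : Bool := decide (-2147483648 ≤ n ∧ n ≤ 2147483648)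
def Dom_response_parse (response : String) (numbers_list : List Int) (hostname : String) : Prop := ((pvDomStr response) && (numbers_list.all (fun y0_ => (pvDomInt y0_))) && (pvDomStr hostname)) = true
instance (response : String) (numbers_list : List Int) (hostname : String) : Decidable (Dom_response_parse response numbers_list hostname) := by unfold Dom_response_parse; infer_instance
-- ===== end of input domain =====

-- B fuses A's two loops into one pass that builds the result string directly (no
-- intermediate list, no second helper, the unreachable '<Error: 2>' branch dropped): simpler.

-- ===== PORT A =====
-- 'received_time += char if char.isdecimal()' inner loop of A
def pvDigitsA (cs : List Char) : List Char :=
  cs.foldl (fun acc c => if PySem.Chars.isdigit c then acc ++ [c] else acc) []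

-- the 'for i in numbers_list' loop; none = the IndexError path ('<Error: 1>')
def pvLoopA (parts : List (List Char)) : List Int → List (List Char) → Option (List (List Char))
  | [], acc => some acc
  | i :: rest, acc =>
    match PySem.List.pyGet? parts i with
    | none => none
    | some t => pvLoopA parts rest (acc ++ [pvDigitsA t])

-- the 'for i in range(request_count)' loop of helper result(); none = IndexError ('<Error: 2>')
def pvResLoopA (tr : List (List Char)) : List Nat → List Char → Option (List Char)
  | [], acc => some acc
  | i :: rest, acc =>
    match tr[i]? with
    | none => none
    | some t => pvResLoopA tr rest (acc ++ "Время ответа = ".toList ++ t ++ " ms \n".toList)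

-- helper result(time_response, request_count, hostname)
def pvResultA (time_response : List (List Char)) (request_count : Nat) (hostname : String) : String :=
  match pvResLoopA time_response (List.range request_count) [] with
  | none => String.ofList ("<Error: 2> ".toList ++ hostname.toList ++ "\n<невозможно вывести результат>".toList)
  | some r => String.ofList ("Адрес ".toList ++ hostname.toList ++ " доступен! ✅ \n".toList ++ r)

def response_parse (response : String) (numbers_list : List Int) (hostname : String) : String :=
  match pvLoopA (PySem.Chars.splitOn response.toList "=".toList) numbers_list [] with
  | none => String.ofList ("<Error: 1> ".toList ++ hostname.toList ++ "\n<превышен интервал ожидания>".toList)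
  | some tr => pvResultA tr numbers_list.length hostname

-- ===== PORT B =====
-- ''.join(c for c in parts[i] if c.isdecimal())
def pvDigitsB (cs : List Char) : List Char := cs.filter PySem.Chars.isdigit

-- B's single loop; none = the early '<Error: 1>' return
def pvLoopB (parts : List (List Char)) : List Int → List Char → Option (List Char)
  | [], acc => some acc
  | i :: rest, acc =>
    if PySem.Raise.InRange parts.length i then
      pvLoopB parts rest (acc ++ "Время ответа = ".toList ++
        pvDigitsB (PySem.List.pyGetD parts i []) ++ " ms \n".toList)
    else none

def response_parse_alt (response : String) (numbers_list : List Int) (hostname : String) : String :=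
  match pvLoopB (PySem.Chars.splitOn response.toList "=".toList) numbers_list
      ("Адрес ".toList ++ hostname.toList ++ " доступен! ✅ \n".toList) with
  | none => String.ofList ("<Error: 1> ".toList ++ hostname.toList ++ "\n<превышен интервал ожидания>".toList)
  | some body => String.ofList body

-- ===== PRECONDITION & SPEC =====
def Spec_response_parse (response : String) (numbers_list : List Int) (hostname : String) (out : String) : Prop := out = response_parse_alt response numbers_list hostname
instance (response : String) (numbers_list : List Int) (hostname : String) (out : String) : Decidable (Spec_response_parse response numbers_list hostname out) := by unfold Spec_response_parse; infer_instance

-- ===== CLAIM (what is proved, stated in full; the proofs are below) =====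
def Claim_equal_response_parse : Prop := ∀ (response : String) (numbers_list : List Int) (hostname : String), Dom_response_parse response numbers_list hostname → Spec_response_parse response numbers_list hostname (response_parse response numbers_list hostname)

-- ===== LEMMAS AND PROOFS =====

def pvFmt (t : List Char) : List Char :=
  "Время ответа = ".toList ++ t ++ " ms \n".toList

theorem pvDigitsA_eq (cs : List Char) : pvDigitsA cs = pvDigitsB cs := by
  simp [pvDigitsA, pvDigitsB, PySem.List.foldl_append_if_eq_filter]

theorem pvGet_of_inRange (xs : List (List Char)) (i : Int)
    (h : PySem.Raise.InRange xs.length i) :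
    PySem.List.pyGet? xs i = some (PySem.List.pyGetD xs i []) := by
  have h2 : PySem.List.pyGet? xs i ≠ none := by
    rw [Ne, PySem.List.pyGet?_eq_none_iff]; simpa using h
  simp only [PySem.List.pyGet?, PySem.List.pyGetD] at h2 ⊢
  cases hk : PySem.List.pyIdx? xs.length i with
  | none => simp [hk] at h2
  | some k =>
    simp only [hk, Option.bind_some] at h2 ⊢
    cases hg : xs[k]? with
    | none => simp [hg] at h2
    | some v => simp

theorem pvLoopA_ok (parts : List (List Char)) (nl : List Int) (acc : List (List Char))
    (h : ∀ i ∈ nl, PySem.Raise.InRange parts.length i) :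
    pvLoopA parts nl acc =
      some (acc ++ nl.map (fun i => pvDigitsA (PySem.List.pyGetD parts i []))) := by
  induction nl generalizing acc with
  | nil => simp [pvLoopA]
  | cons i rest ih =>
    have hi := h i (by simp)
    have : PySem.List.pyGet? parts i = some (PySem.List.pyGetD parts i []) :=
      pvGet_of_inRange parts i hi
    simp [pvLoopA, this, ih _ (fun j hj => h j (by simp [hj]))]

theorem pvLoopA_bad (parts : List (List Char)) (nl : List Int) (acc : List (List Char))
    (h : ¬ ∀ i ∈ nl, PySem.Raise.InRange parts.length i) :
    pvLoopA parts nl acc = none := by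
  induction nl generalizing acc with
  | nil => simp at h
  | cons i rest ih =>
    by_cases hi : PySem.Raise.InRange parts.length i
    · have : PySem.List.pyGet? parts i = some (PySem.List.pyGetD parts i []) :=
        pvGet_of_inRange parts i hi
      simp [pvLoopA, this]
      exact ih _ (fun hall => h (by intro j hj; rcases List.mem_cons.1 hj with rfl | hj; exact hi; exact hall j hj))
    · have : PySem.List.pyGet? parts i = none := by
        rw [PySem.List.pyGet?_eq_none_iff]; exact hi
      simp [pvLoopA, this]

theorem pvLoopB_ok (parts : List (List Char)) (nl : List Int) (acc : List Char)
    (h : ∀ i ∈ nl, PySem.Raise.InRange parts.length i) :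
    pvLoopB parts nl acc =
      some (acc ++ (nl.map (fun i => pvFmt (pvDigitsB (PySem.List.pyGetD parts i [])))).flatten) := by
  induction nl generalizing acc with
  | nil => simp [pvLoopB]
  | cons i rest ih =>
    have hi := h i (by simp)
    simp [pvLoopB, hi, ih _ (fun j hj => h j (by simp [hj])), pvFmt]
  
theorem pvLoopB_bad (parts : List (List Char)) (nl : List Int) (acc : List Char)
    (h : ¬ ∀ i ∈ nl, PySem.Raise.InRange parts.length i) :
    pvLoopB parts nl acc = none := by
  induction nl generalizing acc with
  | nil => simp at h
  | cons i rest ih =>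
    by_cases hi : PySem.Raise.InRange parts.length i
    · simp [pvLoopB, hi]
      exact ih _ (fun hall => h (by intro j hj; rcases List.mem_cons.1 hj with rfl | hj; exact hi; exact hall j hj))
    · simp [pvLoopB, hi]

theorem pvResLoopA_ok (tr : List (List Char)) (idxs : List Nat) (acc : List Char)
    (h : ∀ i ∈ idxs, i < tr.length) :
    pvResLoopA tr idxs acc =
      some (acc ++ (idxs.map (fun i => pvFmt (tr.getD i []))).flatten) := by
  induction idxs generalizing acc with
  | nil => simp [pvResLoopA]
  | cons i rest ih =>
    have hi := h i (by simp)
    have hg : tr[i]? = some (tr.getD i []) := by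
      rw [List.getElem?_eq_getElem hi, List.getD_eq_getElem tr [] hi]
    have hrest : ∀ j ∈ rest, j < tr.length := fun j hj => h j (List.mem_cons_of_mem _ hj)
    simp only [pvResLoopA, hg]
    rw [ih _ hrest]
    simp [pvFmt]

-- ===== VERDICT (by name: the statement is the Claim_ definition above) =====
theorem response_parse_spec : Claim_equal_response_parse := by
  intro response nl hostname _
  unfold Spec_response_parse response_parse response_parse_alt
  generalize PySem.Chars.splitOn response.toList "=".toList = parts
  by_cases h : ∀ i ∈ nl, PySem.Raise.InRange parts.length i
  · rw [pvLoopA_ok parts nl [] h, pvLoopB_ok parts nl _ h]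
    simp only [List.nil_append]
    unfold pvResultA
    rw [pvResLoopA_ok _ _ _ (by intro i hi; rw [List.mem_range] at hi; simpa using hi)]
    have hmaps : (List.range nl.length).map
        (fun i => pvFmt ((Option.map (fun j => pvDigitsA (PySem.List.pyGetD parts j [])) nl[i]?).getD [])) =
        nl.map (fun j => pvFmt (pvDigitsB (PySem.List.pyGetD parts j []))) := by
      apply List.ext_getElem
      · simp
      · intro i h1 h2
        simp only [List.getElem_map, List.getElem_range]
        rw [List.getElem?_eq_getElem (by simpa using h1)]
        simp [pvDigitsA_eq]
    simp [hmaps]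
  · rw [pvLoopA_bad parts nl [] h, pvLoopB_bad parts nl _ h]
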